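-- pv_equiv track=rewrite | github.com/spikems/tumnus | tumnus/preprocess/dedup.py | getStartPos
-- ===== SOURCE A (Python) =====
-- def getStartPos(line, colid):
--     """
--         get the pos of the start column by the column id
--         return:
--             -1  ; no colid exist
--             >=0 ; start position
--     """
--     if colid > 0:
--         pos = line.find(' ')
--         while pos >= 0:
--             colid -= 1
--             if colid == 0:
--                 return pos
--             pos = line.find(' ', pos+1)
--
--         return -1
--     else:
--         return 0
-- ===== SOURCE B (Python) =====
-- def getStartPos(line, colid):
--     """Index-then-lookup: collect all space positions once, then answer by list indexing."""
--     if colid <= 0: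
--         return 0
--     positions = [i for i, c in enumerate(line) if c == ' ']
--     if colid <= len(positions):
--         return positions[colid - 1]
--     return -1
-- ===== Notes on version B (the rewrite author's own statement) =====
-- stated objective: alternative
-- what changed: Replaces the cursor-advancing str.find while-loop with a single comprehension that indexes all space positions, answering by direct list lookup (positions[colid-1]) with the same guard order.
import Mathlib
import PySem

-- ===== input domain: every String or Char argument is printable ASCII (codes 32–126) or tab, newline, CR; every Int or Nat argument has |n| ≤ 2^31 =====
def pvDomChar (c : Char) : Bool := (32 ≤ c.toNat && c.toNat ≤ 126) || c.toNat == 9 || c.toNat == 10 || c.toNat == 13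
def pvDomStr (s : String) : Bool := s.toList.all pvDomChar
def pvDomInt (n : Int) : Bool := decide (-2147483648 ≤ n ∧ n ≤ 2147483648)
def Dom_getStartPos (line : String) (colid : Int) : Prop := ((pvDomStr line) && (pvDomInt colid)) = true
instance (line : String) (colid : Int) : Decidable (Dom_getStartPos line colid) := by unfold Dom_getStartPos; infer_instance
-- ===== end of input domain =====

-- B replaces A's cursor-advancing str.find while-loop by building the list of all space
-- positions once and answering by direct list indexing (objective: alternative decomposition).

-- ===== PORT A =====
-- A's while loop: `pos` is the search cursor, the Nat argument is the current (positive) colid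
def getStartPosLoop (line : String) (pos : Int) : Nat → Int
  | 0 => -1            -- unreachable: the loop is only entered with colid > 0
  | n + 1 =>
    if 0 ≤ pos then
      -- colid -= 1; if colid == 0: return pos; pos = line.find(' ', pos+1)
      if n = 0 then pos
      else getStartPosLoop line (PySem.Str.findFrom line " " (pos + 1) none) n
    else -1

def getStartPos (line : String) (colid : Int) : Int :=
  if colid > 0 then
    getStartPosLoop line (PySem.Str.find line " ") colid.toNat
  else 0

-- ===== PORT B =====
def getStartPos_alt (line : String) (colid : Int) : Int :=
  if colid ≤ 0 then 0
  else
    -- positions = [i for i, c in enumerate(line) if c == ' ']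
    let positions : List Int :=
      ((PySem.List.enumerate line.toList 0).filter (fun p => p.2 == ' ')).map Prod.fst
    if colid ≤ positions.length then
      -- positions[colid - 1]: the guard makes the index in range, so getD's default is never used
      (positions[(colid - 1).toNat]?).getD (-1)
    else -1

-- ===== PRECONDITION & SPEC =====
def Spec_getStartPos (line : String) (colid : Int) (out : Int) : Prop := out = getStartPos_alt line colid
instance (line : String) (colid : Int) (out : Int) : Decidable (Spec_getStartPos line colid out) := by unfold Spec_getStartPos; infer_instance

-- ===== CLAIM (what is proved, stated in full; the proofs are below) =====
def Claim_equal_getStartPos : Prop := ∀ (line : String) (colid : Int), Dom_getStartPos line colid → Spec_getStartPos line colid (getStartPos line colid)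

-- ===== LEMMAS AND PROOFS =====

-- the list of space positions of cs (as Ints), exactly as B builds it
def pvSpaces (cs : List Char) : List Int :=
  ((PySem.List.enumerate cs 0).filter (fun p => p.2 == ' ')).map Prod.fst

-- indexing with default -1, the value both sides ultimately compute
def pvIdx (l : List Int) (n : Nat) : Int := (l[n]?).getD (-1)

theorem pvSpaces_mem {cs : List Char} {i : Int} :
    i ∈ pvSpaces cs ↔ ∃ (k : Nat) (h : k < cs.length), i = (k : Int) ∧ cs[k] = ' ' := by
  simp only [pvSpaces, List.mem_map, List.mem_filter, PySem.List.mem_enumerate_iff]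
  constructor
  · rintro ⟨p, ⟨⟨k, hk, rfl⟩, hsp⟩, rfl⟩
    exact ⟨k, hk, by simp, by simpa using hsp⟩
  · rintro ⟨k, hk, rfl, hsp⟩
    exact ⟨((k : Int), ' '), ⟨⟨k, hk, by simp [hsp]⟩, by simp⟩, rfl⟩

theorem pvSpaces_pairwise (cs : List Char) : (pvSpaces cs).Pairwise (· < ·) := by
  unfold pvSpaces
  exact List.Pairwise.map _ (by intro a b h; exact h)
    ((PySem.List.pairwise_lt_enumerate cs 0).filter _)

-- [' '] is a prefix of cs.drop j  ↔  cs[j]? = some ' '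
theorem pvPrefix_drop (cs : List Char) (j : Nat) :
    [' '] <+: cs.drop j ↔ cs[j]? = some ' ' := by
  rw [List.cons_prefix_iff]
  constructor
  · rintro ⟨l', hl, -⟩
    have : (cs.drop j)[0]? = some ' ' := by rw [hl]; rfl
    simpa [List.getElem?_drop] using this
  · intro h
    have h0 : (cs.drop j)[0]? = some ' ' := by simpa [List.getElem?_drop] using h
    cases hd : cs.drop j with
    | nil => simp [hd] at h0
    | cons a t => rw [hd] at h0; simp at h0; exact ⟨t, by rw [h0], List.nil_prefix⟩

theorem pvSingleton_infix {a : Char} {l : List Char} : [a] <:+: l ↔ a ∈ l := by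
  constructor
  · rintro ⟨s, t, rfl⟩; simp
  · intro h
    obtain ⟨s, t, rfl⟩ := List.append_of_mem h
    exact ⟨s, t, by simp⟩

-- a space occurs at or after k  ↔  the filtered position list is nonempty
theorem pvInfix_drop_iff {cs : List Char} {k : Nat} :
    [' '] <:+: cs.drop k ↔ ∃ i : Int, i ∈ pvSpaces cs ∧ (k : Int) ≤ i := by
  rw [pvSingleton_infix]
  constructor
  · intro h
    obtain ⟨j, hj, hv⟩ := List.mem_iff_getElem.mp h
    refine ⟨((k + j : Nat) : Int), pvSpaces_mem.mpr ⟨k + j, ?_, rfl, ?_⟩, by omega⟩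
    · have := hj; simp [List.length_drop] at this ⊢; omega
    · simpa [List.getElem_drop] using hv
  · rintro ⟨i, hi, hk⟩
    obtain ⟨m, hm, rfl, hsp⟩ := pvSpaces_mem.mp hi
    have hkm : k ≤ m := by exact_mod_cast hk
    apply List.mem_iff_getElem.mpr
    exact ⟨m - k, by simp [List.length_drop]; omega, by rw [List.getElem_drop]; simpa [Nat.add_sub_cancel' hkm] using hsp⟩

theorem pvFindFrom_eq_nil {cs : List Char} {k : Nat} (hk : k ≤ cs.length)
    (h : (pvSpaces cs).filter (fun i => decide ((k : Int) ≤ i)) = []) :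
    PySem.Chars.findFrom cs [' '] (k : Int) none = -1 := by
  rw [PySem.Chars.findFrom_natCast_eq_neg_one_iff cs [' '] k hk]
  rw [pvInfix_drop_iff]
  rintro ⟨i, hi, hki⟩
  have := List.filter_eq_nil_iff.mp h i hi
  simp [hki] at this

theorem pvFindFrom_eq_head {cs : List Char} {k : Nat} {i : Int} {t : List Int} (hk : k ≤ cs.length)
    (h : (pvSpaces cs).filter (fun j => decide ((k : Int) ≤ j)) = i :: t) :
    PySem.Chars.findFrom cs [' '] (k : Int) none = i := by
  have hi : i ∈ (pvSpaces cs).filter (fun j => decide ((k : Int) ≤ j)) := by rw [h]; simp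
  have hiS : i ∈ pvSpaces cs := (List.mem_filter.mp hi).1
  have hki : (k : Int) ≤ i := by have := (List.mem_filter.mp hi).2; simpa using this
  have hne : PySem.Chars.findFrom cs [' '] (k : Int) none ≠ -1 := by
    intro hcontra
    exact (PySem.Chars.findFrom_natCast_eq_neg_one_iff cs [' '] k hk).mp hcontra
      (pvInfix_drop_iff.mpr ⟨i, hiS, hki⟩)
  obtain ⟨hle, hpre, hmin⟩ := PySem.Chars.findFrom_natCast_spec cs [' '] k hk hne
  set r := PySem.Chars.findFrom cs [' '] (k : Int) none with hr
  have hr0 : 0 ≤ r := le_trans (Int.natCast_nonneg k) hle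
  have hsp : cs[r.toNat]? = some ' ' := (pvPrefix_drop cs r.toNat).mp hpre
  have hrlen : r.toNat < cs.length := by
    rcases List.getElem?_eq_some_iff.mp hsp with ⟨hl, _⟩; exact hl
  have hrS : r ∈ pvSpaces cs := by
    refine pvSpaces_mem.mpr ⟨r.toNat, hrlen, by omega, ?_⟩
    exact (List.getElem?_eq_some_iff.mp hsp).2
  have hrmem : r ∈ i :: t := by
    rw [← h]; exact List.mem_filter.mpr ⟨hrS, by simp; omega⟩
  have hpw : (i :: t).Pairwise (· < ·) := h ▸ (pvSpaces_pairwise cs).filter _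
  have hir : i ≤ r := by
    rcases List.mem_cons.mp hrmem with rfl | hrt
    · exact le_refl _
    · exact le_of_lt (List.rel_of_pairwise_cons hpw hrt)
  obtain ⟨m, hm, rfl, hspM⟩ := pvSpaces_mem.mp hiS
  have hkm : k ≤ m := by exact_mod_cast hki
  have : ¬ (m < r.toNat) := by
    intro hlt
    exact hmin m hkm hlt ((pvPrefix_drop cs m).mpr (by simp [List.getElem?_eq_some_iff]; exact ⟨hm, hspM⟩))
  omega

theorem pvFilter_tail {cs : List Char} {k : Nat} {i : Int} {t : List Int}
    (h : (pvSpaces cs).filter (fun j => decide ((k : Int) ≤ j)) = i :: t) :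
    (pvSpaces cs).filter (fun j => decide (i + 1 ≤ j)) = t := by
  have hi : i ∈ (pvSpaces cs).filter (fun j => decide ((k : Int) ≤ j)) := by rw [h]; simp
  have hki : (k : Int) ≤ i := by have := (List.mem_filter.mp hi).2; simpa using this
  have hpw : (i :: t).Pairwise (· < ·) := h ▸ (pvSpaces_pairwise cs).filter _
  have step : (pvSpaces cs).filter (fun j => decide (i + 1 ≤ j))
      = ((pvSpaces cs).filter (fun j => decide ((k : Int) ≤ j))).filter (fun j => decide (i + 1 ≤ j)) := by
    rw [List.filter_filter]
    apply List.filter_congr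
    intro x _
    by_cases hx : i + 1 ≤ x
    · simp [hx]; omega
    · simp [hx]
  rw [step, h]
  simp only [List.filter_cons]
  have : ¬ (i + 1 ≤ i) := by omega
  simp only [this, decide_false]
  exact List.filter_eq_self.mpr (fun x hx => by simp; have := List.rel_of_pairwise_cons hpw hx; omega)

-- the loop computes indexing into the filtered space-position list
theorem pvLoop (line : String) (n k : Nat) (hk : k ≤ line.toList.length) :
    getStartPosLoop line (PySem.Chars.findFrom line.toList [' '] (k : Int) none) (n + 1)
      = pvIdx ((pvSpaces line.toList).filter (fun j => decide ((k : Int) ≤ j))) n := by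
  induction n generalizing k with
  | zero =>
    cases h : (pvSpaces line.toList).filter (fun j => decide ((k : Int) ≤ j)) with
    | nil =>
      rw [pvFindFrom_eq_nil hk h]
      simp [getStartPosLoop, pvIdx]
    | cons i t =>
      have hge : (0:Int) ≤ i := le_trans (Int.natCast_nonneg k)
        (by have := (List.mem_filter.mp (h ▸ List.mem_cons_self)).2; simpa using this)
      rw [pvFindFrom_eq_head hk h]
      simp [getStartPosLoop, pvIdx, hge]
  | succ m ih =>
    cases h : (pvSpaces line.toList).filter (fun j => decide ((k : Int) ≤ j)) with
    | nil =>
      rw [pvFindFrom_eq_nil hk h]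
      simp [getStartPosLoop, pvIdx]
    | cons i t =>
      have hiS : i ∈ pvSpaces line.toList := (List.mem_filter.mp (h ▸ List.mem_cons_self)).1
      obtain ⟨j, hj, rfl, hsp⟩ := pvSpaces_mem.mp hiS
      have hge : (0:Int) ≤ (j:Int) := by exact_mod_cast Nat.zero_le j
      rw [pvFindFrom_eq_head hk h]
      show (if 0 ≤ (j:Int) then
          if m + 1 = 0 then (j:Int)
          else getStartPosLoop line (PySem.Str.findFrom line " " ((j:Int) + 1) none) (m+1)
        else -1) = _
      rw [if_pos hge, if_neg (Nat.succ_ne_zero m)]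
      have hcast : ((j:Int) + 1) = ((j+1 : Nat) : Int) := by push_cast; ring
      have hfr : PySem.Str.findFrom line " " ((j:Int) + 1) none
          = PySem.Chars.findFrom line.toList [' '] ((j+1 : Nat) : Int) none := by
        rw [PySem.Str.findFrom_eq, hcast]; rfl
      rw [hfr, ih (j+1) (by omega)]
      have ht : (pvSpaces line.toList).filter (fun x => decide (((j+1:Nat):Int) ≤ x)) = t := by
        have h2 := pvFilter_tail h
        rw [hcast] at h2
        exact h2
      rw [ht]
      simp [pvIdx]

theorem pvMain (line : String) (colid : Int) : getStartPos line colid = getStartPos_alt line colid := by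
  by_cases hc : colid ≤ 0
  · simp [getStartPos, getStartPos_alt, hc]
  · have hpos : colid > 0 := by omega
    have hm : colid.toNat = (colid.toNat - 1) + 1 := by omega
    rw [getStartPos, if_pos hpos, hm]
    have hfind : PySem.Str.find line " " = PySem.Chars.findFrom line.toList [' '] ((0:Nat):Int) none := by
      rw [PySem.Str.find_eq, Nat.cast_zero, PySem.Chars.findFrom_zero]; rfl
    rw [hfind, pvLoop line _ 0 (Nat.zero_le _)]
    have hfilter : (pvSpaces line.toList).filter (fun j => decide (((0:Nat):Int) ≤ j)) = pvSpaces line.toList := by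
      apply List.filter_eq_self.mpr
      intro x hx
      obtain ⟨m, _, rfl, _⟩ := pvSpaces_mem.mp hx
      simp
    rw [hfilter]
    rw [getStartPos_alt, if_neg hc]
    have hP : ((PySem.List.enumerate line.toList 0).filter (fun p => p.2 == ' ')).map Prod.fst = pvSpaces line.toList := rfl
    simp only [hP]
    have hidx : (colid - 1).toNat = colid.toNat - 1 := by omega
    by_cases hlen : colid ≤ (pvSpaces line.toList).length
    · rw [if_pos hlen, hidx]; rfl
    · rw [if_neg hlen, pvIdx]
      have : (pvSpaces line.toList)[colid.toNat - 1]? = none := by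
        apply List.getElem?_eq_none
        omega
      rw [this]; rfl

-- ===== VERDICT (by name: the statement is the Claim_ definition above) =====
theorem getStartPos_spec : Claim_equal_getStartPos := by
  intro line colid _
  exact pvMain line colid
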